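-- pv_equiv track=rewrite | github.com/sadbody123/CUHKSZ-GroupDiscussionSystem | app/review/engines/rubric_mapper.py | _tag_bucket
-- ===== SOURCE A (Python) =====
-- def _tag_bucket(tags: list[str], category: str | None) -> str | None:
--     tset = {x.lower() for x in tags}
--     cat = (category or "").lower()
--     if "group" in tset or "balance" in tset or "coordination" in cat:
--         return "balance_and_coordination"
--     if "fluency" in tset or "oral" in tset:
--         return "fluency_proxy"
--     if "delivery" in tset or "pause" in tset:
--         return "delivery_proxy"
--     if "interaction" in tset or "discussion" in cat:
--         return "interaction"
--     if "language" in tset or "phrase" in tset: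
--         return "discussion_language"
--     if "example" in tset or "evidence" in tset:
--         return "support_and_examples"
--     if "content" in tset or "argument" in tset:
--         return "content"
--     return None
-- ===== SOURCE B (Python) =====
-- _KEY_RANK = {
--     "group": 0, "balance": 0,
--     "fluency": 1, "oral": 1,
--     "delivery": 2, "pause": 2,
--     "interaction": 3,
--     "language": 4, "phrase": 4,
--     "example": 5, "evidence": 5,
--     "content": 6, "argument": 6,
-- }
--
-- _CAT_RULES = [("coordination", 0), ("discussion", 3)]
--
-- _BUCKETS = [
--     "balance_and_coordination", "fluency_proxy", "delivery_proxy",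
--     "interaction", "discussion_language", "support_and_examples", "content",
-- ]
--
--
-- def _tag_bucket(tags: list[str], category: str | None) -> str | None:
--     # Best (smallest) priority of any rule triggered by a tag keyword.
--     best = 7
--     for t in tags:
--         best = min(best, _KEY_RANK.get(t.lower(), 7))
--     # Category substrings can also trigger a rule; keep the smallest priority.
--     cat = (category or "").lower()
--     for sub, rank in _CAT_RULES:
--         if sub in cat and rank < best:
--             best = rank
--     return _BUCKETS[best] if best < 7 else None
-- ===== Notes on version B (the rewrite author's own statement) =====
-- stated objective: alternative
-- what changed: Instead of scanning the rule cascade testing set membership per keyword, B scans the TAGS once, mapping each lowered tag through a keyword-to-priority dict and keeping the minimum priority, then lowers the category and lets the two category substrings lower the priority, and finally indexes a bucket table by the resulting priority (None if no rule fired); correctness: the first matching branch of A's cascade is exactly the minimum-priority rule triggered by any tag or category substring.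
import Mathlib
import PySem

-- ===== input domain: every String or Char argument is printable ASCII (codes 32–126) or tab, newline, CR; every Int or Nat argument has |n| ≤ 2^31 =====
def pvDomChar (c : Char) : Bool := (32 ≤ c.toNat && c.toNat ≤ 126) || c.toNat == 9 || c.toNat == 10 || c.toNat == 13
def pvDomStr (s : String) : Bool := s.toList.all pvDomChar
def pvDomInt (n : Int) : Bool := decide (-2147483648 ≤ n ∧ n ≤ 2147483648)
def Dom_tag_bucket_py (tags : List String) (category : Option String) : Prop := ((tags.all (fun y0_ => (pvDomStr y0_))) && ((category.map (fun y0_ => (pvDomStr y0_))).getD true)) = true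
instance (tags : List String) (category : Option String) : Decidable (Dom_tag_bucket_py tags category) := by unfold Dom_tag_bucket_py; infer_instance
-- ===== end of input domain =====

-- B replaces A's rule cascade of set-membership tests by a min-priority scan over the tags
-- through a keyword→priority dict, plus two category-substring priority rules, then a bucket
-- table lookup (objective: alternative algorithm, same cost).

-- ===== PORT A =====
def tag_bucket_py (tags : List String) (category : Option String) : Option String :=
  let tset : PySem.Set String := PySem.Set.ofList (tags.map PySem.Str.lower)
  let cat : String := PySem.Str.lower (category.getD "")
  if PySem.Set.contains tset "group" || PySem.Set.contains tset "balance" || PySem.Str.isIn "coordination" cat then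
    some "balance_and_coordination"
  else if PySem.Set.contains tset "fluency" || PySem.Set.contains tset "oral" then
    some "fluency_proxy"
  else if PySem.Set.contains tset "delivery" || PySem.Set.contains tset "pause" then
    some "delivery_proxy"
  else if PySem.Set.contains tset "interaction" || PySem.Str.isIn "discussion" cat then
    some "interaction"
  else if PySem.Set.contains tset "language" || PySem.Set.contains tset "phrase" then
    some "discussion_language"
  else if PySem.Set.contains tset "example" || PySem.Set.contains tset "evidence" then
    some "support_and_examples"
  else if PySem.Set.contains tset "content" || PySem.Set.contains tset "argument" then
    some "content"
  else
    none

-- ===== PORT B =====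
-- _KEY_RANK: keyword → priority (a Python dict literal; keys are distinct)
def pvKeyRank : PySem.Dict String Int := PySem.Dict.mk
  [ ("group", 0), ("balance", 0),
    ("fluency", 1), ("oral", 1),
    ("delivery", 2), ("pause", 2),
    ("interaction", 3),
    ("language", 4), ("phrase", 4),
    ("example", 5), ("evidence", 5),
    ("content", 6), ("argument", 6) ]

def pvCatRules : List (String × Int) := [("coordination", 0), ("discussion", 3)]

def pvBuckets : List String :=
  [ "balance_and_coordination", "fluency_proxy", "delivery_proxy",
    "interaction", "discussion_language", "support_and_examples", "content" ]

def tag_bucket_py_alt (tags : List String) (category : Option String) : Option String :=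
  -- best = min over tags of _KEY_RANK.get(t.lower(), 7)
  let best0 : Int := tags.foldl (fun b t => min b (pvKeyRank.getD (PySem.Str.lower t) 7)) 7
  let cat : String := PySem.Str.lower (category.getD "")
  -- for sub, rank in _CAT_RULES: if sub in cat and rank < best: best = rank
  let best : Int := pvCatRules.foldl
    (fun b r => if PySem.Str.isIn r.1 cat = true ∧ r.2 < b then r.2 else b) best0
  -- _BUCKETS[best] if best < 7 else None (best lies in [0,7) there, so pyGet? is exact)
  if best < 7 then PySem.List.pyGet? pvBuckets best else none

-- ===== PRECONDITION & SPEC =====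
def Spec_tag_bucket_py (tags : List String) (category : Option String) (out : Option String) : Prop := out = tag_bucket_py_alt tags category
instance (tags : List String) (category : Option String) (out : Option String) : Decidable (Spec_tag_bucket_py tags category out) := by unfold Spec_tag_bucket_py; infer_instance

-- ===== CLAIM (what is proved, stated in full; the proofs are below) =====
def Claim_equal_tag_bucket_py : Prop := ∀ (tags : List String) (category : Option String), Dom_tag_bucket_py tags category → Spec_tag_bucket_py tags category (tag_bucket_py tags category)

-- ===== LEMMAS AND PROOFS =====

-- pvM tags k : does some tag lower to keyword k
def pvM (tags : List String) (k : String) : Bool := tags.any (fun t => PySem.Str.lower t == k)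

-- the minimum keyword priority over the tags, written as a cascade over A's seven tag conditions
def pvCascade (tags : List String) : Int :=
  if pvM tags "group" || pvM tags "balance" then 0
  else if pvM tags "fluency" || pvM tags "oral" then 1
  else if pvM tags "delivery" || pvM tags "pause" then 2
  else if pvM tags "interaction" then 3
  else if pvM tags "language" || pvM tags "phrase" then 4
  else if pvM tags "example" || pvM tags "evidence" then 5
  else if pvM tags "content" || pvM tags "argument" then 6
  else 7

set_option maxHeartbeats 1000000 in
lemma pvRank_cascade (s : String) :
    pvKeyRank.getD s 7 =
      (if ("group":String) == s then 0 else if ("balance":String) == s then 0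
       else if ("fluency":String) == s then 1 else if ("oral":String) == s then 1
       else if ("delivery":String) == s then 2 else if ("pause":String) == s then 2
       else if ("interaction":String) == s then 3
       else if ("language":String) == s then 4 else if ("phrase":String) == s then 4
       else if ("example":String) == s then 5 else if ("evidence":String) == s then 5
       else if ("content":String) == s then 6 else if ("argument":String) == s then 6
       else (7:Int)) := by
  rw [PySem.Dict.getD_eq_get?_getD]
  simp only [pvKeyRank, PySem.Dict.get?_mk_cons]
  simp only [apply_ite (fun o : Option Int => o.getD 7), Option.getD_some, Option.getD_none,
    PySem.Dict.get?, List.find?_nil, Option.map_none, Option.getD_none]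

lemma pvM_cons (t : String) (ts : List String) (k : String) :
    pvM (t :: ts) k = ((PySem.Str.lower t == k) || pvM ts k) := by
  simp [pvM]

lemma pvCascade_le (tags : List String) : pvCascade tags ≤ 7 := by
  unfold pvCascade; split_ifs <;> omega

set_option maxHeartbeats 2000000 in
lemma pvCascade_cons (t : String) (ts : List String) :
    min (pvKeyRank.getD (PySem.Str.lower t) 7) (pvCascade ts) = pvCascade (t :: ts) := by
  rw [pvRank_cascade]
  by_cases h0 : PySem.Str.lower t = "group"
  · simp [pvCascade, pvM_cons, h0]
    split_ifs <;> omega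
  ·
    by_cases h1 : PySem.Str.lower t = "balance"
    · simp [pvCascade, pvM_cons, h0, h1]
      split_ifs <;> omega
    ·
      by_cases h2 : PySem.Str.lower t = "fluency"
      · simp [pvCascade, pvM_cons, h0, h1, h2]
        split_ifs <;> omega
      ·
        by_cases h3 : PySem.Str.lower t = "oral"
        · simp [pvCascade, pvM_cons, h0, h1, h2, h3]
          split_ifs <;> omega
        ·
          by_cases h4 : PySem.Str.lower t = "delivery"
          · simp [pvCascade, pvM_cons, h0, h1, h2, h3, h4]
            split_ifs <;> omega
          ·
            by_cases h5 : PySem.Str.lower t = "pause"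
            · simp [pvCascade, pvM_cons, h0, h1, h2, h3, h4, h5]
              split_ifs <;> omega
            ·
              by_cases h6 : PySem.Str.lower t = "interaction"
              · simp [pvCascade, pvM_cons, h0, h1, h2, h3, h4, h5, h6]
                split_ifs <;> omega
              ·
                by_cases h7 : PySem.Str.lower t = "language"
                · simp [pvCascade, pvM_cons, h0, h1, h2, h3, h4, h5, h6, h7]
                  split_ifs <;> omega
                ·
                  by_cases h8 : PySem.Str.lower t = "phrase"
                  · simp [pvCascade, pvM_cons, h0, h1, h2, h3, h4, h5, h6, h7, h8]
                    split_ifs <;> omega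
                  ·
                    by_cases h9 : PySem.Str.lower t = "example"
                    · simp [pvCascade, pvM_cons, h0, h1, h2, h3, h4, h5, h6, h7, h8, h9]
                      split_ifs <;> omega
                    ·
                      by_cases h10 : PySem.Str.lower t = "evidence"
                      · simp [pvCascade, pvM_cons, h0, h1, h2, h3, h4, h5, h6, h7, h8, h9, h10]
                        split_ifs <;> omega
                      ·
                        by_cases h11 : PySem.Str.lower t = "content"
                        · simp [pvCascade, pvM_cons, h0, h1, h2, h3, h4, h5, h6, h7, h8, h9, h10, h11]
                          split_ifs <;> omega
                        ·
                          by_cases h12 : PySem.Str.lower t = "argument"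
                          · simp [pvCascade, pvM_cons, h0, h1, h2, h3, h4, h5, h6, h7, h8, h9, h10, h11, h12]
                            split_ifs <;> omega
                          ·
                            simp [pvCascade, pvM_cons, h0, Ne.symm h0, h1, Ne.symm h1,
                              h2, Ne.symm h2, h3, Ne.symm h3, h4, Ne.symm h4, h5, Ne.symm h5,
                              h6, Ne.symm h6, h7, Ne.symm h7, h8, Ne.symm h8, h9, Ne.symm h9,
                              h10, Ne.symm h10, h11, Ne.symm h11, h12, Ne.symm h12]
                            split_ifs <;> omega

lemma pvFoldl_min (tags : List String) :
    ∀ c : Int, c ≤ 7 →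
      tags.foldl (fun b t => min b (pvKeyRank.getD (PySem.Str.lower t) 7)) c
        = min c (pvCascade tags) := by
  induction tags with
  | nil =>
    intro c hc
    simp [pvCascade, pvM]
    omega
  | cons t ts ih =>
    intro c hc
    rw [List.foldl_cons, ih _ (le_trans (min_le_left _ _) hc), min_assoc, pvCascade_cons]

lemma pvSetContains (tags : List String) (k : String) :
    PySem.Set.contains (PySem.Set.ofList (tags.map PySem.Str.lower)) k = pvM tags k := by
  rw [Bool.eq_iff_iff]
  simp only [pysem, pvM, List.any_eq_true, beq_iff_eq, List.contains_iff_mem, List.mem_map]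

-- the pure combinational core: A's cascade equals B's min-priority bucket lookup
lemma pvCascadeEq (c0 c1 c2 c3 c4 c5 c6 co di : Bool) :
    (if c0 || co then some "balance_and_coordination"
     else if c1 then some "fluency_proxy"
     else if c2 then some "delivery_proxy"
     else if c3 || di then some "interaction"
     else if c4 then some "discussion_language"
     else if c5 then some "support_and_examples"
     else if c6 then some "content"
     else none)
    = (let r : Int := if c0 then 0 else if c1 then 1 else if c2 then 2 else if c3 then 3
                      else if c4 then 4 else if c5 then 5 else if c6 then 6 else 7
       let r1 : Int := if co = true ∧ (0:Int) < r then 0 else r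
       let r2 : Int := if di = true ∧ (3:Int) < r1 then 3 else r1
       if r2 < 7 then PySem.List.pyGet? pvBuckets r2 else none) := by
  cases c0 <;> cases c1 <;> cases c2 <;> cases c3 <;> cases c4 <;> cases c5 <;> cases c6 <;>
    cases co <;> cases di <;> decide

-- ===== VERDICT (by name: the statement is the Claim_ definition above) =====
theorem tag_bucket_py_spec : Claim_equal_tag_bucket_py := by
  intro tags category _
  unfold Spec_tag_bucket_py tag_bucket_py tag_bucket_py_alt
  simp only [pvSetContains, pvCatRules, List.foldl_cons, List.foldl_nil,
    pvFoldl_min tags 7 (le_refl 7)]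
  have hmin : min (7:Int) (pvCascade tags) = pvCascade tags := by
    have := pvCascade_le tags; omega
  rw [hmin]
  have hc : pvCascade tags =
      (if pvM tags "group" || pvM tags "balance" then (0:Int)
       else if pvM tags "fluency" || pvM tags "oral" then 1
       else if pvM tags "delivery" || pvM tags "pause" then 2
       else if pvM tags "interaction" then 3
       else if pvM tags "language" || pvM tags "phrase" then 4
       else if pvM tags "example" || pvM tags "evidence" then 5
       else if pvM tags "content" || pvM tags "argument" then 6 else 7) := rfl
  rw [hc]
  exact pvCascadeEq (pvM tags "group" || pvM tags "balance")
    (pvM tags "fluency" || pvM tags "oral")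
    (pvM tags "delivery" || pvM tags "pause")
    (pvM tags "interaction")
    (pvM tags "language" || pvM tags "phrase")
    (pvM tags "example" || pvM tags "evidence")
    (pvM tags "content" || pvM tags "argument")
    (PySem.Str.isIn "coordination" (PySem.Str.lower (category.getD "")))
    (PySem.Str.isIn "discussion" (PySem.Str.lower (category.getD "")))
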